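-- pv_equiv track=rewrite | github.com/lishehao-ctrl/CalendarDIFF | scripts/evaluate_local_email_prefilter.py | split_course_token
-- ===== SOURCE A (Python) =====
-- def split_course_token(value: str) -> str | None:
--     prefix = []
--     suffix = []
--     hit_digit = False
--     for char in value:
--         if char.isdigit():
--             hit_digit = True
--         if hit_digit:
--             suffix.append(char)
--         else:
--             prefix.append(char)
--     if prefix and suffix:
--         return f"{''.join(prefix)} {''.join(suffix)}"
--     return None
-- ===== SOURCE B (Python) =====
-- def split_course_token(value: str) -> str | None:
--     i = next((j for j, c in enumerate(value) if c.isdigit()), None)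
--     if i is None or i == 0:
--         return None
--     return f"{value[:i]} {value[i:]}"
-- ===== Notes on version B (the rewrite author's own statement) =====
-- stated objective: idiomatic
-- what changed: Replaces A's fused two-accumulator loop with a find-the-first-digit-index-then-slice decomposition (next over enumerate, then two slices).
import Mathlib
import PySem

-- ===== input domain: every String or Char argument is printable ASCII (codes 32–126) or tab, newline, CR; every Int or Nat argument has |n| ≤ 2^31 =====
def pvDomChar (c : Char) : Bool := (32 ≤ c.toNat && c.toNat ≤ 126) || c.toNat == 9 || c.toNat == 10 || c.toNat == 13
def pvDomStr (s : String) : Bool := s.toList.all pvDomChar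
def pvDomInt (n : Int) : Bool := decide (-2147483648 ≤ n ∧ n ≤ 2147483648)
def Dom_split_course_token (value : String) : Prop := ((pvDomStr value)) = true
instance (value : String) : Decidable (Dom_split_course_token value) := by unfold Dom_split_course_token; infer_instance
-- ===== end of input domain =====

-- B replaces A's fused two-accumulator loop by find-the-first-digit-index then slice (idiomatic decomposition; same cost).


-- ===== PORT A =====
-- loop state: (prefix, suffix, hit_digit), chars appended exactly as A does
def split_course_token (value : String) : Option String :=
  let st := value.toList.foldl
    (fun (acc : List Char × List Char × Bool) c =>
      let hit := acc.2.2 || PySem.Chars.isdigit c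
      if hit then (acc.1, acc.2.1 ++ [c], hit) else (acc.1 ++ [c], acc.2.1, hit))
    ([], [], false)
  if st.1 ≠ [] ∧ st.2.1 ≠ [] then some (String.mk (st.1 ++ ' ' :: st.2.1)) else none

-- ===== PORT B =====
def split_course_token_alt (value : String) : Option String :=
  match value.toList.findIdx? (fun c => PySem.Chars.isdigit c) with
  | none => none
  | some i => if i = 0 then none
              else some (String.mk (value.toList.take i ++ ' ' :: value.toList.drop i))

-- ===== PRECONDITION & SPEC =====
def Spec_split_course_token (value : String) (out : Option String) : Prop := out = split_course_token_alt value
instance (value : String) (out : Option String) : Decidable (Spec_split_course_token value out) := by unfold Spec_split_course_token; infer_instance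

-- ===== CLAIM (what is proved, stated in full; the proofs are below) =====
def Claim_equal_split_course_token : Prop := ∀ (value : String), Dom_split_course_token value → Spec_split_course_token value (split_course_token value)

-- ===== LEMMAS AND PROOFS =====

def pvStep (acc : List Char × List Char × Bool) (c : Char) : List Char × List Char × Bool :=
  let hit := acc.2.2 || PySem.Chars.isdigit c
  if hit then (acc.1, acc.2.1 ++ [c], hit) else (acc.1 ++ [c], acc.2.1, hit)

lemma loop_hit (l : List Char) (pre suf : List Char) :
    l.foldl pvStep (pre, suf, true) = (pre, suf ++ l, true) := by
  induction l generalizing suf with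
  | nil => simp
  | cons c cs ih => simp [pvStep, ih]

lemma loop_nohit (l : List Char) (pre : List Char) :
    l.foldl pvStep (pre, [], false)
      = (pre ++ l.takeWhile (fun c => !PySem.Chars.isdigit c),
         l.dropWhile (fun c => !PySem.Chars.isdigit c),
         l.any PySem.Chars.isdigit) := by
  induction l generalizing pre with
  | nil => simp
  | cons c cs ih =>
    by_cases h : PySem.Chars.isdigit c
    · simp [pvStep, h, List.takeWhile_cons, List.dropWhile_cons, loop_hit]
    · simp [pvStep, h, List.takeWhile_cons, List.dropWhile_cons, ih]

lemma findIdx?_none_char (l : List Char) (h : ∀ x ∈ l, PySem.Chars.isdigit x = false) :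
    l.dropWhile (fun c => !PySem.Chars.isdigit c) = [] := by
  simp only [List.dropWhile_eq_nil_iff]
  intro x hx
  simp [h x hx]

lemma findIdx?_some_char (l : List Char) (i : Nat)
    (h : l.findIdx? (fun c => PySem.Chars.isdigit c) = some i) :
    l.take i = l.takeWhile (fun c => !PySem.Chars.isdigit c) ∧
    l.drop i = l.dropWhile (fun c => !PySem.Chars.isdigit c) ∧
    (i = 0 ↔ l.takeWhile (fun c => !PySem.Chars.isdigit c) = []) ∧
    l.drop i ≠ [] := by
  induction l generalizing i with
  | nil => simp at h
  | cons c cs ih =>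
    rw [List.findIdx?_cons] at h
    by_cases hc : PySem.Chars.isdigit c
    · simp [hc] at h
      subst h
      simp [hc, List.takeWhile_cons, List.dropWhile_cons]
    · simp [hc] at h
      obtain ⟨j, hj, hji⟩ := h
      obtain ⟨h1, h2, h3, h4⟩ := ih j hj
      subst hji
      refine ⟨by simp [hc, h1], by simp [hc, h2], by simp [hc], by simpa using h4⟩

-- ===== VERDICT (by name: the statement is the Claim_ definition above) =====
theorem split_course_token_spec : Claim_equal_split_course_token := by
  intro value _
  unfold Spec_split_course_token split_course_token split_course_token_alt
  set l := value.toList with hl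
  show (if _ then _ else _) = _
  rw [show (fun (acc : List Char × List Char × Bool) c =>
      let hit := acc.2.2 || PySem.Chars.isdigit c
      if hit then (acc.1, acc.2.1 ++ [c], hit) else (acc.1 ++ [c], acc.2.1, hit)) = pvStep from rfl]
  rw [show (([], [], false) : List Char × List Char × Bool) = (([] : List Char), [], false) from rfl]
  rw [loop_nohit l []]
  cases hf : l.findIdx? (fun c => PySem.Chars.isdigit c) with
  | none =>
    rw [List.findIdx?_eq_none_iff] at hf
    have hf' : ∀ x ∈ l, PySem.Chars.isdigit x = false := by
      intro x hx; simpa using hf x hx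
    simp [findIdx?_none_char l hf']
  | some i =>
    obtain ⟨h1, h2, h3, h4⟩ := findIdx?_some_char l i hf
    by_cases hi : i = 0
    · simp [hi, h3.mp hi]
    · have htw : l.takeWhile (fun c => !PySem.Chars.isdigit c) ≠ [] := fun h => hi (h3.mpr h)
      have hdw : l.dropWhile (fun c => !PySem.Chars.isdigit c) ≠ [] := by rw [← h2]; exact h4
      simp [hi, htw, hdw, h1, h2]
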